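-- pv_equiv track=rewrite | github.com/abderahmane-ai/CASMO | benchmarks/b7_continual_learning/dataset.py | _create_synthetic_writing
-- ===== SOURCE A (Python) =====
-- def _create_synthetic_writing(count):
--     """Create synthetic creative writing prompts."""
--     prompts = [
--         ("The old house creaked...", "as Sarah stepped inside. Dust covered every surface, and cobwebs hung from the corners. She knew she shouldn't be there, but curiosity drove her forward."),
--         ("The spaceship landed...", "in the middle of the desert. The alien emerged slowly, its eyes scanning the horizon. This was the moment humanity had been waiting for."),
--         ("She opened the letter...", "with trembling hands. The words inside would change everything. After all these years, the truth was finally revealed."),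
--         ("The dragon roared...", "sending flames across the valley. The knight raised his shield, knowing this would be his greatest challenge yet."),
--         ("On her birthday...", "something unexpected happened. A mysterious package arrived with no return address. Inside was a key to a door she'd never seen before."),
--     ]
--
--     data = []
--     for i in range(count):
--         prompt = prompts[i % len(prompts)]
--         data.append({'instruction': f"Continue this story:\n{prompt[0]}", 'response': prompt[1]})
--
--     return data
-- ===== SOURCE B (Python) =====
-- def _create_synthetic_writing(count):
--     """Create synthetic creative writing prompts."""
--     prompts = [
--         ("The old house creaked...", "as Sarah stepped inside. Dust covered every surface, and cobwebs hung from the corners. She knew she shouldn't be there, but curiosity drove her forward."),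
--         ("The spaceship landed...", "in the middle of the desert. The alien emerged slowly, its eyes scanning the horizon. This was the moment humanity had been waiting for."),
--         ("She opened the letter...", "with trembling hands. The words inside would change everything. After all these years, the truth was finally revealed."),
--         ("The dragon roared...", "sending flames across the valley. The knight raised his shield, knowing this would be his greatest challenge yet."),
--         ("On her birthday...", "something unexpected happened. A mysterious package arrived with no return address. Inside was a key to a door she'd never seen before."),
--     ]
--     records = [{'instruction': f"Continue this story:\n{p}", 'response': r} for p, r in prompts]
--     full, rem = divmod(max(count, 0), len(records))
--     return [dict(rec) for rec in records * full + records[:rem]]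
-- ===== Notes on version B (the rewrite author's own statement) =====
-- stated objective: alternative
-- what changed: B precomputes the five finished records once and assembles the result by whole-cycle repetition (records * (n//5) + records[:n%5]) instead of A's per-index loop with i % len indexing; equivalence is about return values (B copies each dict so callers get fresh objects like A's).
import Mathlib
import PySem

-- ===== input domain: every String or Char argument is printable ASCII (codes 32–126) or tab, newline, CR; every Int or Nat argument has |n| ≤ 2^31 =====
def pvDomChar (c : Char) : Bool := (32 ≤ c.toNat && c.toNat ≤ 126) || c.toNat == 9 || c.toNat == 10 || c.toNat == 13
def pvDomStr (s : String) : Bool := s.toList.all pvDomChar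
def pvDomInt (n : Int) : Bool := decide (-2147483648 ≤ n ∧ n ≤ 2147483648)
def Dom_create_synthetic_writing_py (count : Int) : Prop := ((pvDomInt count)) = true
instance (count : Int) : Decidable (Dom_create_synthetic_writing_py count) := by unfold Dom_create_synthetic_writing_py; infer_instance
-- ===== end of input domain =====

-- B builds the result by repeating the whole 5-record cycle (records * full + records[:rem])
-- instead of A's per-index loop with i % len indexing; return values only (B copies each dict).

-- ===== PORT A =====
def pvPrompts : List (String × String) := [
  ("The old house creaked...", "as Sarah stepped inside. Dust covered every surface, and cobwebs hung from the corners. She knew she shouldn't be there, but curiosity drove her forward."),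
  ("The spaceship landed...", "in the middle of the desert. The alien emerged slowly, its eyes scanning the horizon. This was the moment humanity had been waiting for."),
  ("She opened the letter...", "with trembling hands. The words inside would change everything. After all these years, the truth was finally revealed."),
  ("The dragon roared...", "sending flames across the valley. The knight raised his shield, knowing this would be his greatest challenge yet."),
  ("On her birthday...", "something unexpected happened. A mysterious package arrived with no return address. Inside was a key to a door she'd never seen before.")]

def create_synthetic_writing_py (count : Int) : List (List (String × String)) :=
  (PySem.List.pyRange 0 count 1).foldl (fun data i =>
    let prompt := PySem.List.pyGetD pvPrompts (PySem.Int.mod i (pvPrompts.length : Int)) ("", "")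
    data ++ [[("instruction", "Continue this story:\n" ++ prompt.1), ("response", prompt.2)]]) []

-- ===== PORT B =====
def pvRecord (p : String × String) : List (String × String) :=
  [("instruction", "Continue this story:\n" ++ p.1), ("response", p.2)]

def pvRecords : List (List (String × String)) := pvPrompts.map pvRecord

def create_synthetic_writing_py_alt (count : Int) : List (List (String × String)) :=
  let n := max count 0
  let full := PySem.Int.floordiv n (pvRecords.length : Int)
  let rem := PySem.Int.mod n (pvRecords.length : Int)
  -- 'dict(rec)' copies each record; copying is the identity on association lists
  (List.replicate full.toNat pvRecords).flatten ++ pvRecords.take rem.toNat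

-- ===== PRECONDITION & SPEC =====
def Spec_create_synthetic_writing_py (count : Int) (out : List (List (String × String))) : Prop := out = create_synthetic_writing_py_alt count
instance (count : Int) (out : List (List (String × String))) : Decidable (Spec_create_synthetic_writing_py count out) := by unfold Spec_create_synthetic_writing_py; infer_instance

-- ===== CLAIM (what is proved, stated in full; the proofs are below) =====
def Claim_equal_create_synthetic_writing_py : Prop := ∀ (count : Int), Dom_create_synthetic_writing_py count → Spec_create_synthetic_writing_py count (create_synthetic_writing_py count)

-- ===== LEMMAS AND PROOFS =====

theorem pvRecords_length : pvRecords.length = 5 := by rfl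

theorem pvB_step (n : Nat) :
    (List.replicate ((n + 1) / 5) pvRecords).flatten ++ pvRecords.take ((n + 1) % 5)
    = ((List.replicate (n / 5) pvRecords).flatten ++ pvRecords.take (n % 5))
      ++ pvRecords[n % 5]?.toList := by
  by_cases h : n % 5 = 4
  · have h1 : (n + 1) / 5 = n / 5 + 1 := by omega
    have h2 : (n + 1) % 5 = 0 := by omega
    rw [h1, h2, h, List.replicate_succ', List.flatten_append]
    have : pvRecords = pvRecords.take 4 ++ pvRecords[4]?.toList := by
      conv_lhs => rw [← List.take_of_length_le (le_of_eq pvRecords_length)]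
      exact List.take_add_one
    simp [List.append_assoc, ← this]
  · have h1 : (n + 1) / 5 = n / 5 := by omega
    have h2 : (n + 1) % 5 = n % 5 + 1 := by omega
    rw [h1, h2, List.take_add_one, List.append_assoc]

theorem pvA_eq_B_nat (n : Nat) :
    create_synthetic_writing_py (n : Int) = create_synthetic_writing_py_alt (n : Int) := by
  have key : ∀ (m : Nat),
      (PySem.List.pyRange 0 (m : Int) 1).foldl (fun data i =>
        let prompt := PySem.List.pyGetD pvPrompts (PySem.Int.mod i (pvPrompts.length : Int)) ("", "")
        data ++ [[("instruction", "Continue this story:\n" ++ prompt.1), ("response", prompt.2)]]) []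
      = (List.replicate (m / 5) pvRecords).flatten ++ pvRecords.take (m % 5) := by
    intro m
    induction m with
    | zero => simp
    | succ k ih =>
      have hr : PySem.List.pyRange 0 ((k : Int) + 1) 1
          = PySem.List.pyRange 0 (k : Int) 1 ++ [(k : Int)] :=
        PySem.List.pyRange_one_succ_right (by positivity)
      push_cast
      rw [hr, List.foldl_append, ih, pvB_step]
      have hm : PySem.Int.mod (k : Int) ((pvPrompts.length : Nat) : Int) = ((k % 5 : Nat) : Int) := by
        rw [show pvPrompts.length = 5 from rfl]
        exact PySem.Int.mod_natCast k 5
      have hlt : k % 5 < pvPrompts.length := by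
        rw [show pvPrompts.length = 5 from by rfl]; omega
      have hlt' : k % 5 < pvRecords.length := by rw [pvRecords_length]; omega
      rw [List.getElem?_eq_getElem hlt']
      simp only [List.foldl_cons, List.foldl_nil, hm, PySem.List.pyGetD_natCast,
        List.getD_eq_getElem?_getD, List.getElem?_eq_getElem hlt, Option.getD_some,
        Option.toList_some, List.append_assoc]
      simp [pvRecords, List.getElem_map, pvRecord]
  have hfd : PySem.Int.floordiv (n : Int) 5 = ((n / 5 : Nat) : Int) := by
    exact_mod_cast PySem.Int.floordiv_natCast n 5
  have hmd : PySem.Int.mod (n : Int) 5 = ((n % 5 : Nat) : Int) := by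
    exact_mod_cast PySem.Int.mod_natCast n 5
  unfold create_synthetic_writing_py create_synthetic_writing_py_alt
  rw [key n]
  simp only [pvRecords_length, max_eq_left (by positivity : (0:Int) ≤ (n:Int)), Nat.cast_ofNat,
    hfd, hmd, Int.toNat_natCast]

-- ===== VERDICT (by name: the statement is the Claim_ definition above) =====
theorem create_synthetic_writing_py_spec : Claim_equal_create_synthetic_writing_py := by
  intro count _
  unfold Spec_create_synthetic_writing_py
  rcases le_or_gt 0 count with h | h
  · obtain ⟨n, rfl⟩ := Int.eq_ofNat_of_zero_le h
    exact pvA_eq_B_nat n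
  · unfold create_synthetic_writing_py create_synthetic_writing_py_alt
    rw [PySem.List.pyRange_one_eq_nil (by omega)]
    simp [max_eq_right (le_of_lt h), PySem.Int.floordiv, PySem.Int.mod]
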